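-- pv_equiv track=rewrite | github.com/tcr430/Project-Blog | pipeline/scripts/backfill_cluster_metadata.py | set_or_insert_frontmatter_line
-- ===== SOURCE A (Python) =====
-- INSERT_BEFORE_KEYS = ("featured", "estimated_reading_time", "image")
--
-- def set_or_insert_frontmatter_line(frontmatter_raw: str, key: str, value_repr: str) -> str:
--     lines = frontmatter_raw.splitlines()
--     prefix = f"{key}:"
--     replacement = f"{key}: {value_repr}"
--
--     for index, line in enumerate(lines):
--         if line.startswith(prefix):
--             lines[index] = replacement
--             return "\n".join(lines)
--
--     insert_at = len(lines)
--     for index, line in enumerate(lines):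
--         if any(line.startswith(f"{candidate}:") for candidate in INSERT_BEFORE_KEYS):
--             insert_at = index
--             break
--
--     lines.insert(insert_at, replacement)
--     return "\n".join(lines)
-- ===== SOURCE B (Python) =====
-- INSERT_BEFORE_KEYS = ("featured", "estimated_reading_time", "image")
--
-- def set_or_insert_frontmatter_line(frontmatter_raw: str, key: str, value_repr: str) -> str:
--     lines = frontmatter_raw.splitlines()
--     prefix = f"{key}:"
--     replacement = f"{key}: {value_repr}"
--
--     replace_at = None
--     insert_at = None
--     for index, line in enumerate(lines):
--         if line.startswith(prefix):
--             replace_at = index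
--             break
--         if insert_at is None and any(line.startswith(f"{c}:") for c in INSERT_BEFORE_KEYS):
--             insert_at = index
--
--     if replace_at is not None:
--         lines[replace_at] = replacement
--     else:
--         lines.insert(insert_at if insert_at is not None else len(lines), replacement)
--     return "\n".join(lines)
-- ===== Notes on version B (the rewrite author's own statement) =====
-- stated objective: alternative
-- what changed: A's two sequential scans (one for the key line, one for the insert-before position) are merged into a single traversal that records the first replace index and the first insert index, then patches or inserts once.
import Mathlib
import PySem

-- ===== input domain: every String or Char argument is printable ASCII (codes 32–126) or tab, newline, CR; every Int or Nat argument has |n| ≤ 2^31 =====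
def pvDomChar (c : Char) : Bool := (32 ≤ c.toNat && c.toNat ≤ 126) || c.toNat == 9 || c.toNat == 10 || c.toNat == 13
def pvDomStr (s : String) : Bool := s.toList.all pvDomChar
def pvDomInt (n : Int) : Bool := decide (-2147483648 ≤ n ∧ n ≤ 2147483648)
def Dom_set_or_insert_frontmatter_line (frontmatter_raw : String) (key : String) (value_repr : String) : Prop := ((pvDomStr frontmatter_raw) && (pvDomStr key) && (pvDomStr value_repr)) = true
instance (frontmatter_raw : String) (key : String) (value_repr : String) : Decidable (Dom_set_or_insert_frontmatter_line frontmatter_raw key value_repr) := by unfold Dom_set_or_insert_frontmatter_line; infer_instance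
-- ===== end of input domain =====

-- B merges A's two sequential scans into one traversal recording the first replace/insert
-- positions (objective: alternative decomposition, same asymptotic cost).

-- ===== PORT A =====

-- any(line.startswith(f"{candidate}:") for candidate in INSERT_BEFORE_KEYS)
def pvIsCand (line : String) : Bool :=
  PySem.Str.startswith line "featured:" || PySem.Str.startswith line "estimated_reading_time:" ||
    PySem.Str.startswith line "image:"

-- first loop of A: on the first line starting with prefix, replace it and stop
def pvAReplace (pre rep : String) : List String → Option (List String)
  | [] => none
  | l :: rest =>
    if PySem.Str.startswith l pre then some (rep :: rest)
    else (pvAReplace pre rep rest).map (l :: ·)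

-- second loop of A: index of the first INSERT_BEFORE_KEYS line, default len(lines)
def pvAInsertAt : List String → Nat
  | [] => 0
  | l :: rest => if pvIsCand l then 0 else pvAInsertAt rest + 1

def set_or_insert_frontmatter_line (frontmatter_raw : String) (key : String) (value_repr : String) : String :=
  let lines := PySem.Str.splitlines frontmatter_raw
  let pre := key ++ ":"
  let rep := key ++ ": " ++ value_repr
  match pvAReplace pre rep lines with
  | some ls => PySem.Str.join "\n" ls
  | none =>
      PySem.Str.join "\n" (PySem.List.insert lines (pvAInsertAt lines : Int) rep)

-- ===== PORT B =====

-- B's single scan: (first index whose line starts with prefix — stop there,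
--  first index whose line starts with an INSERT_BEFORE_KEYS prefix), relative indices
def pvBScan (pre : String) : List String → Option Nat × Option Nat
  | [] => (none, none)
  | l :: rest =>
    if PySem.Str.startswith l pre then (some 0, none)
    else
      let (r, ins) := pvBScan pre rest
      (r.map (· + 1), if pvIsCand l then some 0 else ins.map (· + 1))

def set_or_insert_frontmatter_line_alt (frontmatter_raw : String) (key : String) (value_repr : String) : String :=
  let lines := PySem.Str.splitlines frontmatter_raw
  let pre := key ++ ":"
  let rep := key ++ ": " ++ value_repr
  match pvBScan pre lines with
  | (some i, _) => PySem.Str.join "\n" (lines.set i rep)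
  | (none, ins) =>
      PySem.Str.join "\n" (PySem.List.insert lines ((ins.getD lines.length : Nat) : Int) rep)

-- ===== PRECONDITION & SPEC =====
def Spec_set_or_insert_frontmatter_line (frontmatter_raw : String) (key : String) (value_repr : String) (out : String) : Prop := out = set_or_insert_frontmatter_line_alt frontmatter_raw key value_repr
instance (frontmatter_raw : String) (key : String) (value_repr : String) (out : String) : Decidable (Spec_set_or_insert_frontmatter_line frontmatter_raw key value_repr out) := by unfold Spec_set_or_insert_frontmatter_line; infer_instance

-- ===== CLAIM (what is proved, stated in full; the proofs are below) =====
def Claim_equal_set_or_insert_frontmatter_line : Prop := ∀ (frontmatter_raw : String) (key : String) (value_repr : String), Dom_set_or_insert_frontmatter_line frontmatter_raw key value_repr → Spec_set_or_insert_frontmatter_line frontmatter_raw key value_repr (set_or_insert_frontmatter_line frontmatter_raw key value_repr)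

-- ===== LEMMAS AND PROOFS =====

-- A's first loop equals the first component of B's scan applied as a set
theorem pvAReplace_eq_scan (pre rep : String) (lines : List String) :
    pvAReplace pre rep lines = ((pvBScan pre lines).1).map (fun i => lines.set i rep) := by
  induction lines with
  | nil => rfl
  | cons l rest ih =>
    simp only [pvAReplace, pvBScan, PySem.Str.startswith]
    by_cases h : PySem.Chars.startswith l.toList pre.toList
    · simp [h]
    · simp only [h, Bool.false_eq_true, if_false, ih]
      cases hfst : (pvBScan pre rest).1 <;> simp

-- when B's scan finds no prefix line, A's second loop equals B's insert position
theorem pvAInsertAt_eq_scan (pre : String) (lines : List String)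
    (h : (pvBScan pre lines).1 = none) :
    pvAInsertAt lines = ((pvBScan pre lines).2).getD lines.length := by
  induction lines with
  | nil => rfl
  | cons l rest ih =>
    simp only [pvBScan, PySem.Str.startswith] at h ⊢
    by_cases hs : PySem.Chars.startswith l.toList pre.toList
    · simp [hs] at h
    · simp only [hs, Bool.false_eq_true, if_false] at h ⊢
      by_cases hc : pvIsCand l
      · simp [pvAInsertAt, hc]
      · have hfst : (pvBScan pre rest).1 = none := by
          cases hfst : (pvBScan pre rest).1 <;> simp [hfst] at h ⊢
        simp only [pvAInsertAt, hc, Bool.false_eq_true, if_false]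
        rw [ih hfst]
        cases hsnd : (pvBScan pre rest).2 <;> simp [List.length_cons]

-- ===== VERDICT (by name: the statement is the Claim_ definition above) =====
theorem set_or_insert_frontmatter_line_spec : Claim_equal_set_or_insert_frontmatter_line := by
  intro fr key v _
  unfold Spec_set_or_insert_frontmatter_line set_or_insert_frontmatter_line
    set_or_insert_frontmatter_line_alt
  simp only []
  rw [pvAReplace_eq_scan]
  cases hp : pvBScan (key ++ ":") (PySem.Str.splitlines fr) with
  | mk r ins =>
    have hfst : (pvBScan (key ++ ":") (PySem.Str.splitlines fr)).1 = r := by rw [hp]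
    cases r with
    | some i => simp
    | none =>
      simp only [Option.map_none]
      rw [pvAInsertAt_eq_scan _ _ hfst, hp]
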